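-- pv_equiv track=rewrite | github.com/projeto-de-algoritmos-2025/DC_exercicios | question3271/code_q3271.py | stringHash
-- ===== SOURCE A (Python) =====
-- def stringHash(s: str, k: int) -> str:
--     result_chars = []
--     n = len(s)
--     for i in range(0, n, k):
--         substring = s[i:i + k]
--         current_sum = 0
--         for char in substring:
--             current_sum += ord(char) - ord('a')
--         hashed_char_index = current_sum % 26
--         new_char = chr(hashed_char_index + ord('a'))
--         result_chars.append(new_char)
--     return "".join(result_chars)
-- ===== SOURCE B (Python) =====
-- def stringHash(s: str, k: int) -> str:
--     n = len(s)
--     prefix = [0]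
--     for ch in s:
--         prefix.append(prefix[-1] + ord(ch) - ord('a'))
--     out = []
--     for i in range(0, n, k):
--         j = min(i + k, n)
--         out.append(chr((prefix[j] - prefix[i]) % 26 + ord('a')))
--     return "".join(out)
-- ===== Notes on version B (the rewrite author's own statement) =====
-- stated objective: alternative
-- what changed: B builds a prefix-sum table in one pass and computes each block's sum by subtraction prefix[min(i+k,n)]-prefix[i], eliminating A's inner per-block character scan.
import Mathlib
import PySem

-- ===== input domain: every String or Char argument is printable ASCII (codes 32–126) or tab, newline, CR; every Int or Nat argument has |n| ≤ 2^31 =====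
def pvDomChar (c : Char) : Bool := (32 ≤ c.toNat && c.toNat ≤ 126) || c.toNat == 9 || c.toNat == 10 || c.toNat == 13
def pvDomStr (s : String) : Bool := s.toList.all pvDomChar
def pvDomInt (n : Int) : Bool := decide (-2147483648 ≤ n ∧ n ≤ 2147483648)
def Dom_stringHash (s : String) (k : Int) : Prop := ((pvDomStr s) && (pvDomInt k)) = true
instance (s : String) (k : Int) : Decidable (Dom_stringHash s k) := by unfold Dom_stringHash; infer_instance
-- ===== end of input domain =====

-- B replaces A's inner per-block character scan by a prefix-sum table and subtraction (alternative decomposition).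

-- ===== PORT A =====
def stringHash (s : String) (k : Int) : String :=
  let cs := s.toList
  let n : Int := cs.length
  let resultChars := (PySem.List.pyRange 0 n k).foldl (fun acc i =>
    let substring := PySem.List.slice cs (some i) (some (i + k))
    let currentSum := substring.foldl (fun c ch => c + ((ch.toNat : Int) - 97)) 0
    let hashedCharIndex := PySem.Int.mod currentSum 26
    acc ++ [Char.ofNat (hashedCharIndex + 97).toNat]) []
  String.ofList resultChars

-- ===== PORT B =====
-- prefix[-1] / prefix[j] / prefix[i] are always in range in Source B, so pyGetD with default 0 is exact here.
def stringHash_alt (s : String) (k : Int) : String :=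
  let cs := s.toList
  let n : Int := cs.length
  let pfx : List Int :=
    cs.foldl (fun p ch => p ++ [PySem.List.pyGetD p (-1) 0 + ((ch.toNat : Int) - 97)]) [0]
  let out := (PySem.List.pyRange 0 n k).foldl (fun acc i =>
    let j := min (i + k) n
    acc ++ [Char.ofNat
      (PySem.Int.mod (PySem.List.pyGetD pfx j 0 - PySem.List.pyGetD pfx i 0) 26 + 97).toNat]) []
  String.ofList out

-- ===== PRECONDITION & SPEC =====
-- Pre_ excludes only k = 0, where Python's range(0, n, 0) raises ValueError in both A and B.
def Pre_stringHash (s : String) (k : Int) : Prop := k ≠ 0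
instance (s : String) (k : Int) : Decidable (Pre_stringHash s k) := by unfold Pre_stringHash; infer_instance
def pvWitness_stringHash : String × Int := ("abc", 2)

def Spec_stringHash (s : String) (k : Int) (out : String) : Prop := out = stringHash_alt s k
instance (s : String) (k : Int) (out : String) : Decidable (Spec_stringHash s k out) := by unfold Spec_stringHash; infer_instance

-- ===== CLAIM (what is proved, stated in full; the proofs are below) =====
def Claim_equal_stringHash : Prop := ∀ (s : String) (k : Int), Dom_stringHash s k → Pre_stringHash s k → Spec_stringHash s k (stringHash s k)

-- ===== LEMMAS AND PROOFS =====

-- the per-character weight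
def pvF (ch : Char) : Int := (ch.toNat : Int) - 97

def pvSums (l : List Char) : Int := (l.map pvF).sum

-- one step of B's prefix-building loop
theorem pvStep_last (p : List Int) (a : Int) (_c : Char) :
    PySem.List.pyGetD (p ++ [a]) (-1) 0 = a := by
  have h := PySem.List.pyGetD_neg_natCast (p ++ [a]) 1 0 (by omega) (by simp)
  simpa using h

theorem pvBuild_eq (cs : List Char) : ∀ (p : List Int) (a : Int),
    cs.foldl (fun p ch => p ++ [PySem.List.pyGetD p (-1) 0 + pvF ch]) (p ++ [a])
      = (p ++ [a]) ++ (List.range cs.length).map (fun j => a + pvSums (cs.take (j+1))) := by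
  induction cs with
  | nil => intro p a; simp
  | cons c cs ih =>
    intro p a
    rw [List.foldl_cons, pvStep_last p a c]
    have h2 := ih (p ++ [a]) (a + pvF c)
    rw [h2, List.length_cons, List.range_succ_eq_map, List.map_cons, List.map_map]
    simp [pvSums, pvF, Function.comp, add_assoc]

theorem pvPrefix_spec (cs : List Char) :
    cs.foldl (fun p ch => p ++ [PySem.List.pyGetD p (-1) 0 + ((ch.toNat : Int) - 97)]) [0]
      = (List.range (cs.length + 1)).map (fun j => pvSums (cs.take j)) := by
  have h := pvBuild_eq cs [] 0
  simp only [List.nil_append] at h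
  have : (fun (p : List Int) (ch : Char) => p ++ [PySem.List.pyGetD p (-1) 0 + ((ch.toNat : Int) - 97)])
       = (fun p ch => p ++ [PySem.List.pyGetD p (-1) 0 + pvF ch]) := by
    funext p ch; simp [pvF]
  rw [this, h, List.range_succ_eq_map]
  simp [List.map_map, Function.comp, pvSums]

theorem pvPrefix_get (cs : List Char) (j : Int) (h0 : 0 ≤ j) (h1 : j ≤ (cs.length : Int)) :
    PySem.List.pyGetD ((List.range (cs.length + 1)).map (fun j => pvSums (cs.take j))) j 0
      = pvSums (cs.take j.toNat) := by
  rw [PySem.List.pyGetD_eq_getElem _ 0 h0 (by simp; omega)]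
  simp

theorem pvSums_append (l₁ l₂ : List Char) : pvSums (l₁ ++ l₂) = pvSums l₁ + pvSums l₂ := by
  simp [pvSums]

-- block sum via prefix subtraction
theorem pvBlock_sum (cs : List Char) (i k : Int) (hk : 0 < k) (h0 : 0 ≤ i) (hi : i < (cs.length : Int)) :
    pvSums (PySem.List.slice cs (some i) (some (i + k)))
      = pvSums (cs.take (min (i + k) (cs.length : Int)).toNat) - pvSums (cs.take i.toNat) := by
  rw [PySem.List.slice_toNat cs h0 (by omega)]
  set j : Int := min (i + k) (cs.length : Int) with hj
  have hij : i ≤ j := by omega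
  have hjn : j.toNat ≤ cs.length := by omega
  have htake : cs.take j.toNat = cs.take i.toNat ++ (cs.drop i.toNat).take (j.toNat - i.toNat) := by
    rw [← List.take_add]
    congr 1
    omega
  rw [htake, pvSums_append]
  have hdroplen : (cs.drop i.toNat).length = cs.length - i.toNat := by simp
  have : (cs.drop i.toNat).take ((i + k).toNat - i.toNat) = (cs.drop i.toNat).take (j.toNat - i.toNat) := by
    rcases le_or_gt (i + k) (cs.length : Int) with h | h
    · have : j = i + k := by omega
      rw [this]
    · have hj' : j = (cs.length : Int) := by omega
      rw [List.take_of_length_le (by omega), List.take_of_length_le (by omega)]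
  rw [this]
  ring

-- A's inner loop is pvSums
theorem pvInner_sum (l : List Char) :
    l.foldl (fun c ch => c + ((ch.toNat : Int) - 97)) 0 = pvSums l := by
  have h := PySem.List.foldl_add l pvF 0
  simp only [pvF] at h
  simpa [pvSums, pvF] using h

theorem pvRange_neg_nil (n k : Int) (hn : 0 ≤ n) (hk : k < 0) :
    PySem.List.pyRange 0 n k = [] := by
  simp only [PySem.List.pyRange]
  rw [if_neg (by omega), if_neg (by omega), if_neg (by omega)]
  simp

-- ===== VERDICT (by name: the statement is the Claim_ definition above) =====
theorem stringHash_spec : Claim_equal_stringHash := by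
  intro s k _ hk
  unfold Spec_stringHash stringHash stringHash_alt
  simp only []
  set cs := s.toList with hcs
  set n : Int := (cs.length : Int) with hn
  congr 1
  rcases lt_trichotomy k 0 with hneg | hzero | hpos
  · rw [pvRange_neg_nil n k (by positivity) hneg]
    simp
  · exact absurd hzero hk
  · rw [pvPrefix_spec cs]
    apply PySem.List.foldl_congr_mem
    intro acc i hi
    rw [PySem.List.mem_pyRange_iff_of_pos hpos] at hi
    obtain ⟨h0, h1, -⟩ := hi
    have hmin0 : (0:Int) ≤ min (i + k) n := by omega
    have hminle : min (i + k) n ≤ n := by omega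
    rw [pvPrefix_get cs _ hmin0 hminle, pvPrefix_get cs i h0 (le_of_lt h1),
      pvInner_sum, pvBlock_sum cs i k hpos h0 h1]
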